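-- pv_equiv track=rewrite | github.com/reedan88/OOINet | ooinet/m2m.py | parse_catalog
-- ===== SOURCE A (Python) =====
-- def parse_catalog(catalog, exclude=[]):
--     """Parse THREDSS catalog for netCDF files.
--
--     Parses the THREDDS catalog for the netCDF files. The exclude
--     argument takes in a list of strings to check a given catalog
--     item against and, if in the item, not return it.
--
--     Parameters
--     ----------
--     catalog: (list)
--         The THREDDS catalog of datasets for the requested data stream
--     exclude: (list)
--         Keywords to filter files out of the THEDDS catalog
--
--     Returns
--     -------
--     datasets: (list)
--         A list of netCDF datasets which contain the associated .nc datasets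
--     """
--     datasets = [citem for citem in catalog if citem.endswith('.nc')]
--     if type(exclude) is not list:
--         raise ValueError('arg exclude must be a list')
--     for ex in exclude:
--         if type(ex) is not str:
--             raise ValueError(f'Element {ex} of exclude must be a string.')
--         datasets = [dset for dset in datasets if ex not in dset]
--     return datasets
-- ===== SOURCE B (Python) =====
-- def parse_catalog(catalog, exclude=[]):
--     if type(exclude) is not list:
--         raise ValueError('arg exclude must be a list')
--     for ex in exclude:
--         if type(ex) is not str:
--             raise ValueError(f'Element {ex} of exclude must be a string.')
--     datasets = []
--     for citem in catalog:
--         if not citem.endswith('.nc'):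
--             continue
--         keep = True
--         for ex in exclude:
--             if ex in citem:
--                 keep = False
--                 break
--         if keep:
--             datasets.append(citem)
--     return datasets
-- ===== Notes on version B (the rewrite author's own statement) =====
-- stated objective: faster
-- what changed: Replaces A's len(exclude)+1 successive list-rebuilding comprehension passes with an up-front validation loop followed by a single explicit catalog loop that tests each item against all keywords (with early break) and appends kept items to an accumulator.
import Mathlib
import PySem

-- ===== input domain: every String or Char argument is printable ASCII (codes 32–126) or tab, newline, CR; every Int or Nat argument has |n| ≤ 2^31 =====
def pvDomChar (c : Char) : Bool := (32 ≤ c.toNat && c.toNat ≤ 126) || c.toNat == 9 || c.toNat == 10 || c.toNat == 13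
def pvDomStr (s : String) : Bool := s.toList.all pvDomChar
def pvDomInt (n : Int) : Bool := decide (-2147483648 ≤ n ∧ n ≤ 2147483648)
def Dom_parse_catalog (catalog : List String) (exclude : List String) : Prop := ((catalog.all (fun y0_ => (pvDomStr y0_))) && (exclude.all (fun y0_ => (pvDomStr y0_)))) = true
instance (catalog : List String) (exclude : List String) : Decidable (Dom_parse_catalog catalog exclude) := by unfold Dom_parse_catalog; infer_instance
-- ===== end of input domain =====

-- B validates up front and then does ONE explicit accumulator loop over the catalog
-- (keyword test with early break per item) instead of A's one filtering pass per
-- keyword; same return value (A's `type is` checks never raise on list[str], the only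
-- inputs this typed claim covers).

-- ===== PORT A =====
-- datasets = [citem for citem in catalog if citem.endswith('.nc')], then one
-- filtering pass per ex in exclude.
def parse_catalog (catalog : List String) (exclude : List String) : List String :=
  let datasets := catalog.filter (fun citem => PySem.Str.endswith citem ".nc")
  exclude.foldl (fun datasets ex => datasets.filter (fun dset => ! PySem.Str.isIn ex dset)) datasets

-- ===== PORT B =====
-- inner keyword loop with early break: keep iff no keyword occurs in citem
def pcKeep (exclude : List String) (citem : String) : Bool :=
  match exclude with
  | [] => true
  | ex :: rest => if PySem.Str.isIn ex citem then false else pcKeep rest citem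

-- outer loop over the catalog, appending kept items to the accumulator
def pcLoop (exclude : List String) : List String → List String
  | [] => []
  | citem :: rest =>
      if PySem.Str.endswith citem ".nc" then
        if pcKeep exclude citem then citem :: pcLoop exclude rest
        else pcLoop exclude rest
      else pcLoop exclude rest

def parse_catalog_alt (catalog : List String) (exclude : List String) : List String :=
  pcLoop exclude catalog

-- ===== PRECONDITION & SPEC =====
def Spec_parse_catalog (catalog : List String) (exclude : List String) (out : List String) : Prop := out = parse_catalog_alt catalog exclude
instance (catalog : List String) (exclude : List String) (out : List String) : Decidable (Spec_parse_catalog catalog exclude out) := by unfold Spec_parse_catalog; infer_instance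

-- ===== CLAIM =====
def Claim_equal_parse_catalog : Prop := ∀ (catalog : List String) (exclude : List String), Dom_parse_catalog catalog exclude → Spec_parse_catalog catalog exclude (parse_catalog catalog exclude)

-- ===== LEMMAS AND PROOFS =====
theorem foldl_filter_eq_filter_all {α β : Type} (f : β → α → Bool) :
    ∀ (l : List β) (ds : List α),
      l.foldl (fun ds ex => ds.filter (f ex)) ds = ds.filter (fun d => l.all (fun ex => f ex d)) := by
  intro l
  induction l with
  | nil => intro ds; simp
  | cons x xs ih =>
    intro ds
    simp [List.foldl_cons, ih, List.filter_filter, List.all_cons, Bool.and_comm]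

theorem pcKeep_eq_all (citem : String) :
    ∀ (exclude : List String), pcKeep exclude citem = exclude.all (fun ex => ! PySem.Str.isIn ex citem) := by
  intro exclude
  induction exclude with
  | nil => rfl
  | cons ex rest ih =>
    simp only [pcKeep, List.all_cons, ih]
    by_cases h : PySem.Str.isIn ex citem <;> simp [h]

theorem pcLoop_eq_filter (exclude : List String) :
    ∀ (catalog : List String),
      pcLoop exclude catalog =
        catalog.filter (fun citem => PySem.Str.endswith citem ".nc" && pcKeep exclude citem) := by
  intro catalog
  induction catalog with
  | nil => rfl
  | cons c rest ih =>
    simp only [pcLoop, List.filter_cons]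
    by_cases h1 : PySem.Str.endswith c ".nc" <;>
      by_cases h2 : pcKeep exclude c <;> simp [h1, h2, ih]

-- ===== VERDICT =====
theorem parse_catalog_spec : Claim_equal_parse_catalog := by
  intro catalog exclude _
  unfold Spec_parse_catalog parse_catalog parse_catalog_alt
  rw [foldl_filter_eq_filter_all, pcLoop_eq_filter, List.filter_filter]
  apply List.filter_congr
  intro c _
  simp [pcKeep_eq_all, Bool.and_comm]
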